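-- pv_equiv track=rewrite | github.com/IgnacioMaqueda/Google-Kick-Start | 2022/RoundB/B-PalindromicFactors.py | palindromic_factors
-- ===== SOURCE A (Python) =====
-- def is_palindromic(n):
--     s = str(n)
--     return s == s[::-1]
--
-- def palindromic_factors(A):
--     res = 0
--     i = 1
--     while i * i <= A:
--         if A % i == 0:
--             if is_palindromic(i):
--                 res += 1
--             j = A // i
--             if j != i and is_palindromic(j):
--                 res += 1
--         i += 1
--     return res
-- ===== SOURCE B (Python) =====
-- def is_palindromic(n):
--     s = str(n)
--     return s == s[::-1]
--
-- def palindromic_factors(A):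
--     if A <= 0:
--         return 0
--     # prime factorisation of A by trial division on a shrinking n
--     factors = []
--     n = A
--     d = 2
--     while d * d <= n:
--         if n % d == 0:
--             e = 0
--             while n % d == 0:
--                 n //= d
--                 e += 1
--             factors.append((d, e))
--         d += 1
--     if n > 1:
--         factors.append((n, 1))
--     # build every divisor from the prime factorisation
--     divs = [1]
--     for p, e in factors:
--         divs = [x * p ** k for x in divs for k in range(e + 1)]
--     res = 0
--     for x in divs:
--         if is_palindromic(x):
--             res += 1
--     return res
-- ===== Notes on version B (the rewrite author's own statement) =====
-- stated objective: alternative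
-- what changed: Instead of A's sqrt-bounded trial division that pairs each small divisor with its cofactor (with j != i deduplication), B computes the prime factorisation of A once and generates every divisor from the prime-power exponent combinations, then counts the palindromic ones.
import Mathlib
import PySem

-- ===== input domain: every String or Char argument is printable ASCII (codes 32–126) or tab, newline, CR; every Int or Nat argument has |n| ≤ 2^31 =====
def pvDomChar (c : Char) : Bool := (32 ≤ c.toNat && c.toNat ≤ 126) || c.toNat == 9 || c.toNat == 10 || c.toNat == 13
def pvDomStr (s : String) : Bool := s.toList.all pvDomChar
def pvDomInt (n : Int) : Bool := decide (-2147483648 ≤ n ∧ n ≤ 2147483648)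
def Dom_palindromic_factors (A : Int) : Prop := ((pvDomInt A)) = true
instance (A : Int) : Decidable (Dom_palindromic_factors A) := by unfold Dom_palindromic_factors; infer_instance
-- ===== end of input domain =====

-- B replaces A's sqrt-bounded trial division with cofactor pairing by a prime factorisation of A followed by generation of all divisors from the exponent combinations (alternative algorithm).

-- ===== PORT A =====
-- shared helper of both Python versions: is_palindromic(n) = (str(n) == str(n)[::-1])
def is_palindromic (n : Int) : Bool :=
  let s := PySem.Int.toStr n
  some s == PySem.Str.slice? s none none (-1)

theorem pf_le_of_sq_le {i A : Int} (h : i * i ≤ A) : i ≤ A := by nlinarith [mul_self_nonneg i, mul_self_nonneg (i - 1)]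

theorem pfLoop_dec (A i : Int) (h : i * i ≤ A) : (A + 1 - (i + 1)).toNat < (A + 1 - i).toNat := by
  have := pf_le_of_sq_le h
  omega

-- the while loop of A
def pfLoop (A i res : Int) : Int :=
  if h : i * i ≤ A then
    let res1 := if PySem.Int.mod A i = 0 then
        let res0 := if is_palindromic i then res + 1 else res
        let j := PySem.Int.floordiv A i
        if j ≠ i && is_palindromic j then res0 + 1 else res0
      else res
    pfLoop A (i + 1) res1
  else res
termination_by (A + 1 - i).toNat
decreasing_by exact pfLoop_dec A i h

def palindromic_factors (A : Int) : Int := pfLoop A 1 0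

-- ===== PORT B =====
-- B's inner while: 'while n % d == 0: n //= d; e += 1' (the '1 ≤ n ∧ 2 ≤ d' guard only makes the recursion total; B reaches it only with 1 ≤ n, 2 ≤ d)
theorem pfInner_dec (n d : Int) (h : 1 ≤ n ∧ 2 ≤ d ∧ PySem.Int.mod n d = 0) :
    (PySem.Int.floordiv n d).toNat < n.toNat := by
  obtain ⟨h1, h2, -⟩ := h
  rw [PySem.Int.floordiv_eq_ediv_of_pos (by omega : (0:Int) < d)]
  have hq : 0 ≤ n / d := Int.ediv_nonneg (by omega) (by omega)
  have hr := Int.emod_nonneg n (show d ≠ 0 by omega)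
  have he := Int.mul_ediv_add_emod n d
  have h3 : 2 * (n / d) ≤ d * (n / d) := by nlinarith
  omega

def pfInner (n d e : Int) : Int × Int :=
  if h : 1 ≤ n ∧ 2 ≤ d ∧ PySem.Int.mod n d = 0 then
    pfInner (PySem.Int.floordiv n d) d (e + 1)
  else (n, e)
termination_by n.toNat
decreasing_by exact pfInner_dec n d h

-- the result of the inner loop is no larger than its input (termination measure of the outer loop)
theorem pfInner_fst_le (n d e : Int) : (pfInner n d e).1 ≤ n := by
  induction n, e using pfInner.induct d with
  | case1 n e h ih =>
    rw [pfInner, dif_pos h]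
    refine le_trans ih ?_
    have h4 := pfInner_dec n d h
    have h1 := h.1
    omega
  | case2 n e h => rw [pfInner, dif_neg h]

theorem pfOuter_dec1 (n d : Int) (h : d * d ≤ n) :
    ((pfInner n d 0).1 + 1 - (d + 1)).toNat < (n + 1 - d).toNat := by
  have h1 := pfInner_fst_le n d 0
  have h2 := pf_le_of_sq_le h
  omega

theorem pfOuter_dec2 (n d : Int) (h : d * d ≤ n) :
    (n + 1 - (d + 1)).toNat < (n + 1 - d).toNat := by
  have h2 := pf_le_of_sq_le h
  omega

-- B's outer factorisation loop: 'while d * d <= n: if n % d == 0: … ; d += 1'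
def pfOuter (n d : Int) (fs : List (Int × Int)) : Int × List (Int × Int) :=
  if h : d * d ≤ n then
    if PySem.Int.mod n d = 0 then
      let r := pfInner n d 0
      pfOuter r.1 (d + 1) (fs ++ [(d, r.2)])
    else pfOuter n (d + 1) fs
  else (n, fs)
termination_by (n + 1 - d).toNat
decreasing_by
  · exact pfOuter_dec1 n d h
  · exact pfOuter_dec2 n d h

-- 'factors' after the two loops and the trailing 'if n > 1'
def pfFactors (A : Int) : List (Int × Int) :=
  let r := pfOuter A 2 []
  if 1 < r.1 then r.2 ++ [(r.1, 1)] else r.2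

-- 'divs = [x * p ** k for x in divs for k in range(e + 1)]' — p ** k ported as p ^ k.toNat (exact: k from range(e+1) is nonnegative)
def pfDivs (fs : List (Int × Int)) : List Int :=
  fs.foldl (fun divs pe =>
    divs.flatMap (fun x => (PySem.List.pyRange 0 (pe.2 + 1) 1).map (fun k => x * pe.1 ^ k.toNat))) [1]

def palindromic_factors_alt (A : Int) : Int :=
  if A ≤ 0 then 0
  else (pfDivs (pfFactors A)).foldl (fun res x => if is_palindromic x then res + 1 else res) 0

-- ===== PRECONDITION & SPEC =====
def Spec_palindromic_factors (A : Int) (out : Int) : Prop := out = palindromic_factors_alt A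
instance (A : Int) (out : Int) : Decidable (Spec_palindromic_factors A out) := by unfold Spec_palindromic_factors; infer_instance

-- ===== CLAIM (what is proved, stated in full; the proofs are below) =====
def Claim_equal_palindromic_factors : Prop := ∀ (A : Int), Dom_palindromic_factors A → Spec_palindromic_factors A (palindromic_factors A)

-- ===== LEMMAS AND PROOFS =====

-- the divisors d of A with a ≤ d ≤ A satisfying q (Finset.Ico on Int is noncomputable in Mathlib; proof-side only)
noncomputable def pfSet (A a : Int) (q : Int → Prop) [DecidablePred q] : Finset Int :=
  (Finset.Ico a (A + 1)).filter (fun d => A % d = 0 ∧ q d)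

theorem pfLoop_unfold (A i res : Int) (h : i * i ≤ A) :
    pfLoop A i res = pfLoop A (i + 1)
      (if PySem.Int.mod A i = 0 then
        (let res0 := if is_palindromic i then res + 1 else res
         if (PySem.Int.floordiv A i ≠ i : Bool) && is_palindromic (PySem.Int.floordiv A i) then res0 + 1 else res0)
       else res) := by
  rw [pfLoop, dif_pos h]

theorem pf_div_iff (A i : Int) (hdvd : A % i = 0) (hi : 1 ≤ i) : A / i = i ↔ A = i * i := by
  have hd : i ∣ A := Int.dvd_iff_emod_eq_zero.mpr hdvd
  constructor
  · intro h
    have := Int.ediv_mul_cancel hd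
    rw [h] at this
    omega
  · intro h
    rw [h, Int.mul_ediv_cancel _ (by omega)]

theorem pfSet_card_step (A i : Int) (q : Int → Prop) [DecidablePred q] (h2 : i ≤ A) :
    ((pfSet A i q).card : Int)
      = (if A % i = 0 ∧ q i then 1 else 0) + ((pfSet A (i + 1) q).card : Int) := by
  have hins : Finset.Ico i (A + 1) = insert i (Finset.Ico (i + 1) (A + 1)) := by
    apply Finset.ext
    intro d
    simp only [Finset.mem_insert, Finset.mem_Ico]
    omega
  have hnotmem : i ∉ pfSet A (i + 1) q := by
    intro h
    simp only [pfSet, Finset.mem_filter, Finset.mem_Ico] at h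
    omega
  unfold pfSet
  rw [hins, Finset.filter_insert]
  split_ifs with h
  · rw [Finset.card_insert_of_notMem (by simp only [pfSet] at hnotmem; exact hnotmem)]
    push_cast
    ring
  · simp

-- A's loop counts palindromic divisors d with d*d ≤ A plus divisors d whose palindromic cofactor A/d ≠ d
theorem pfLoop_eq_card (A : Int) (_hA : 1 ≤ A) :
    ∀ (i res : Int), 1 ≤ i →
      pfLoop A i res = res
        + ((pfSet A i (fun d => d * d ≤ A ∧ is_palindromic d = true)).card : Int)
        + ((pfSet A i (fun d => d * d ≤ A ∧ A ≠ d * d ∧ is_palindromic (A / d) = true)).card : Int) := by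
  have key : ∀ (n : Nat) (i res : Int), 1 ≤ i → (A + 1 - i).toNat = n →
      pfLoop A i res = res
        + ((pfSet A i (fun d => d * d ≤ A ∧ is_palindromic d = true)).card : Int)
        + ((pfSet A i (fun d => d * d ≤ A ∧ A ≠ d * d ∧ is_palindromic (A / d) = true)).card : Int) := by
    intro n
    induction n with
    | zero =>
      intro i res hi hn
      have hAi : A < i := by omega
      have hgt : ¬ i * i ≤ A := by
        intro h
        have h2 : i * 1 ≤ i * i := mul_le_mul_of_nonneg_left hi (by omega)
        rw [mul_one] at h2
        linarith
      rw [pfLoop, dif_neg hgt]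
      have hico : Finset.Ico i (A + 1) = ∅ := Finset.Ico_eq_empty (by omega)
      unfold pfSet
      rw [hico, Finset.filter_empty, Finset.filter_empty]
      simp
    | succ n ih =>
      intro i res hi hn
      have hiA : i ≤ A := by omega
      by_cases hsq : i * i ≤ A
      · rw [pfLoop_unfold A i res hsq, ih (i + 1) _ (by omega) (by omega),
          pfSet_card_step A i (fun d => d * d ≤ A ∧ is_palindromic d = true) hiA,
          pfSet_card_step A i (fun d => d * d ≤ A ∧ A ≠ d * d ∧ is_palindromic (A / d) = true) hiA,
          PySem.Int.mod_eq_emod_of_pos (by omega : (0:Int) < i),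
          PySem.Int.floordiv_eq_ediv_of_pos (by omega : (0:Int) < i)]
        by_cases hdvd : A % i = 0
        · have hiff : A / i = i ↔ A = i * i := pf_div_iff A i hdvd (by omega)
          rw [if_pos hdvd]
          have iteL : (if A % i = 0 ∧ (i * i ≤ A ∧ is_palindromic i = true) then (1:Int) else 0)
              = (if is_palindromic i = true then 1 else 0) := by
            by_cases hp : is_palindromic i = true <;> simp [hdvd, hsq, hp]
          have iteH : (if A % i = 0 ∧ (i * i ≤ A ∧ A ≠ i * i ∧ is_palindromic (A / i) = true) then (1:Int) else 0)
              = (if ((A / i ≠ i : Bool) && is_palindromic (A / i)) = true then 1 else 0) := by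
            by_cases hne : A = i * i
            · have hji : A / i = i := hiff.mpr hne
              rw [hji]
              simp [hne]
            · have hji : A / i ≠ i := fun h => hne (hiff.mp h)
              by_cases hq : is_palindromic (A / i) = true <;> simp [hdvd, hsq, hne, hji, hq]
          rw [iteL, iteH]
          split_ifs <;> ring
        · rw [if_neg hdvd]
          have e1 : (if A % i = 0 ∧ (i * i ≤ A ∧ is_palindromic i = true) then (1:Int) else 0) = 0 :=
            if_neg (fun h => hdvd h.1)
          have e2 : (if A % i = 0 ∧ (i * i ≤ A ∧ A ≠ i * i ∧ is_palindromic (A / i) = true) then (1:Int) else 0) = 0 :=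
            if_neg (fun h => hdvd h.1)
          rw [e1, e2]
          ring
      · rw [pfLoop, dif_neg hsq]
        have hL : ∀ (q : Int → Prop) (_ : DecidablePred q) (h : ∀ d, i ≤ d → ¬ q d),
            pfSet A i q = ∅ := by
          intro q hq h
          rw [Finset.eq_empty_iff_forall_notMem]
          intro d hd
          simp only [pfSet, Finset.mem_filter, Finset.mem_Ico] at hd
          exact h d hd.1.1 hd.2.2
        have hdd : ∀ d : Int, i ≤ d → d * d ≤ A → i * i ≤ A := by
          intro d hd hda
          have h1 : i * i ≤ d * d := mul_le_mul hd hd (by omega) (by omega)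
          linarith
        rw [hL _ _ (fun d hd hq => hsq (hdd d hd hq.1)),
          hL _ _ (fun d hd hq => hsq (hdd d hd hq.1))]
        simp
  exact fun i res hi => key (A + 1 - i).toNat i res hi rfl

-- the cofactor facts: for a divisor d of A, A/d is again a divisor and d ↦ A/d is involutive
theorem pf_cof (A d : Int) (hA : 1 ≤ A) (h1 : 1 ≤ d) (hm : A % d = 0) :
    1 ≤ A / d ∧ A / d ≤ A ∧ A % (A / d) = 0 ∧ A / (A / d) = d ∧ (A / d) * d = A := by
  have hd : d ∣ A := Int.dvd_iff_emod_eq_zero.mpr hm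
  have he : A / d * d = A := Int.ediv_mul_cancel hd
  have h1e : 1 ≤ A / d := by
    by_contra h
    rw [Int.not_le] at h
    have h2 : A / d * d ≤ 0 := mul_nonpos_iff.mpr (Or.inr ⟨by omega, by omega⟩)
    linarith
  have h2e : A / d ≤ A := by
    have h2 : A / d * 1 ≤ A / d * d := mul_le_mul_of_nonneg_left h1 (by omega)
    rw [mul_one] at h2
    linarith
  have hdd : A / (A / d) = d := by
    calc A / (A / d) = ((A / d) * d) / (A / d) := by rw [he]
    _ = d := Int.mul_ediv_cancel_left _ (by omega)
  have hm2 : A % (A / d) = 0 := by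
    rw [← Int.dvd_iff_emod_eq_zero]
    exact ⟨d, by linarith [he]⟩
  exact ⟨h1e, h2e, hm2, hdd, he⟩

-- the cofactor map d ↦ A / d is a bijection onto the palindromic divisors above the square root
theorem pf_bij (A : Int) (hA : 1 ≤ A) :
    (pfSet A 1 (fun d => d * d ≤ A ∧ A ≠ d * d ∧ is_palindromic (A / d) = true)).card
      = ((Finset.Ico 1 (A + 1)).filter (fun d => A % d = 0 ∧ ¬ d * d ≤ A ∧ is_palindromic d = true)).card := by
  apply Finset.card_bij' (i := fun d _ => A / d) (j := fun d _ => A / d)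
  · intro d hd
    simp only [pfSet, Finset.mem_filter, Finset.mem_Ico] at hd ⊢
    obtain ⟨⟨hd1, hd2⟩, hm, hsq, hne, hpal⟩ := hd
    obtain ⟨h1e, h2e, hm2, hdd, he⟩ := pf_cof A d hA hd1 hm
    have hlt : d * d < A := lt_of_le_of_ne hsq (fun h => hne h.symm)
    have hde : d < A / d := by
      by_contra h
      have h2 : A / d * d ≤ d * d := mul_le_mul_of_nonneg_right (Int.not_lt.mp h) (by omega)
      linarith
    refine ⟨⟨h1e, by omega⟩, hm2, ?_, hpal⟩
    intro habs
    have h2 : A / d * d < A / d * (A / d) := mul_lt_mul_of_pos_left hde (by omega)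
    linarith
  · intro b hb
    simp only [pfSet, Finset.mem_filter, Finset.mem_Ico] at hb ⊢
    obtain ⟨⟨hb1, hb2⟩, hm, hsq, hpal⟩ := hb
    obtain ⟨h1e, h2e, hm2, hdd, he⟩ := pf_cof A b hA hb1 hm
    rw [Int.not_le] at hsq
    have hde : A / b < b := by
      by_contra h
      have h2 : b * b ≤ A / b * b := mul_le_mul_of_nonneg_right (Int.not_lt.mp h) (by omega)
      linarith
    have hlt : (A / b) * (A / b) < A := by
      have h2 : A / b * (A / b) < A / b * b := mul_lt_mul_of_pos_left hde (by omega)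
      linarith
    refine ⟨⟨h1e, by omega⟩, hm2, le_of_lt hlt, by omega, ?_⟩
    rw [hdd]
    exact hpal
  · intro d hd
    simp only [pfSet, Finset.mem_filter, Finset.mem_Ico] at hd
    exact (pf_cof A d hA hd.1.1 hd.2.1).2.2.2.1
  · intro b hb
    simp only [Finset.mem_filter, Finset.mem_Ico] at hb
    exact (pf_cof A b hA hb.1.1 hb.2.1).2.2.2.1

theorem pf_split (A : Int) :
    ((pfSet A 1 (fun d => is_palindromic d = true)).card : Int)
      = ((pfSet A 1 (fun d => d * d ≤ A ∧ is_palindromic d = true)).card : Int)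
        + (((Finset.Ico 1 (A + 1)).filter (fun d => A % d = 0 ∧ ¬ d * d ≤ A ∧ is_palindromic d = true)).card : Int) := by
  have h := Finset.card_filter_add_card_filter_not (s := pfSet A 1 (fun d => is_palindromic d = true))
    (p := fun d => d * d ≤ A)
  have h1 : (pfSet A 1 (fun d => is_palindromic d = true)).filter (fun d => d * d ≤ A)
      = pfSet A 1 (fun d => d * d ≤ A ∧ is_palindromic d = true) := by
    unfold pfSet
    rw [Finset.filter_filter]
    apply Finset.ext
    intro d
    simp only [Finset.mem_filter, Finset.mem_Ico]
    constructor
    · rintro ⟨hIco, ⟨hm, hp⟩, hq⟩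
      exact ⟨hIco, hm, hq, hp⟩
    · rintro ⟨hIco, hm, hq, hp⟩
      exact ⟨hIco, ⟨hm, hp⟩, hq⟩
  have h2 : (pfSet A 1 (fun d => is_palindromic d = true)).filter (fun d => ¬ d * d ≤ A)
      = (Finset.Ico 1 (A + 1)).filter (fun d => A % d = 0 ∧ ¬ d * d ≤ A ∧ is_palindromic d = true) := by
    unfold pfSet
    rw [Finset.filter_filter]
    apply Finset.ext
    intro d
    simp only [Finset.mem_filter, Finset.mem_Ico]
    constructor
    · rintro ⟨hIco, ⟨hm, hp⟩, hq⟩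
      exact ⟨hIco, hm, hq, hp⟩
    · rintro ⟨hIco, hm, hq, hp⟩
      exact ⟨hIco, ⟨hm, hp⟩, hq⟩
  rw [h1, h2] at h
  exact_mod_cast h.symm

-- ========== B-side lemmas: correctness of the factorisation and the divisor generation ==========

-- the inner loop divides out every factor d: 1 ≤ n', d ∤ n', n = n' * d^count, and at least one factor is removed when d ∣ n
theorem pfInner_spec (n d e : Int) (h1 : 1 ≤ n) (h2 : 2 ≤ d) :
    1 ≤ (pfInner n d e).1 ∧ ¬ d ∣ (pfInner n d e).1 ∧ e ≤ (pfInner n d e).2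
      ∧ n = (pfInner n d e).1 * d ^ ((pfInner n d e).2 - e).toNat
      ∧ (d ∣ n → e < (pfInner n d e).2) := by
  revert h1
  induction n, e using pfInner.induct d with
  | case1 n e h ih =>
    intro h1
    have hd0 : (0:Int) < d := by omega
    have hmod : n % d = 0 := by
      have := h.2.2
      rwa [PySem.Int.mod_eq_emod_of_pos hd0] at this
    have hdvd : d ∣ n := Int.dvd_of_emod_eq_zero hmod
    have hfd : PySem.Int.floordiv n d = n / d := PySem.Int.floordiv_eq_ediv_of_pos hd0
    have hq1 : 1 ≤ n / d := (Int.le_ediv_iff_mul_le hd0).mpr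
      (by have := Int.le_of_dvd (by omega) hdvd; omega)
    have hqd : n / d * d = n := Int.ediv_mul_cancel hdvd
    rw [pfInner, dif_pos h]
    obtain ⟨i1, i2, i3, i4, _⟩ := ih (by rw [hfd]; exact hq1)
    refine ⟨i1, i2, by omega, ?_, fun _ => by omega⟩
    have hE : ((pfInner (PySem.Int.floordiv n d) d (e + 1)).2 - e).toNat
        = ((pfInner (PySem.Int.floordiv n d) d (e + 1)).2 - (e + 1)).toNat + 1 := by omega
    rw [hE, pow_succ, ← mul_assoc, ← i4, hfd, hqd]
  | case2 n e h =>
    intro h1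
    have hnd : ¬ d ∣ n := by
      intro hdvd
      exact h ⟨h1, h2, by
        rw [PySem.Int.mod_eq_emod_of_pos (by omega)]
        exact Int.emod_eq_zero_of_dvd hdvd⟩
    rw [pfInner, dif_neg h]
    exact ⟨h1, hnd, le_refl e, by norm_num, fun hdvd => absurd hdvd hnd⟩

-- a divisor d of n below which n has no divisor ≥ 2 is prime
theorem pf_prime_of_min (d n : Int) (h2 : 2 ≤ d) (hd : d ∣ n) (h1 : 1 ≤ n)
    (hmin : ∀ m, 2 ≤ m → m < d → ¬ m ∣ n) : Prime d := by
  rw [Int.prime_iff_natAbs_prime, Nat.prime_def_lt]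
  refine ⟨by omega, ?_⟩
  intro m hmlt hmdvd
  by_contra hm1
  have hm0 : m ≠ 0 := by
    rintro rfl
    have : d.natAbs = 0 := Nat.eq_zero_of_zero_dvd hmdvd
    omega
  have hmd : (m : Int) ∣ d := by
    have h := Int.natCast_dvd_natCast.mpr hmdvd
    rwa [Int.natAbs_of_nonneg (by omega : (0:Int) ≤ d)] at h
  exact hmin (m : Int) (by omega) (by omega) (hmd.trans hd)

-- an n > 1 with no divisor in [2, dq) and dq*dq > n is prime
theorem pf_prime_of_no_small (n dq : Int) (hn : 1 < n) (h2 : 2 ≤ dq)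
    (hbig : ¬ dq * dq ≤ n) (hmin : ∀ m, 2 ≤ m → m < dq → ¬ m ∣ n) : Prime n := by
  rw [Int.prime_iff_natAbs_prime]
  by_contra hnp
  obtain ⟨m, hmdvd, hm2, hmlt⟩ := Nat.exists_dvd_of_not_prime2 (by omega) hnp
  obtain ⟨k, hk⟩ := hmdvd
  have hk2 : 2 ≤ k := by
    have hk0 : k ≠ 0 := by
      rintro rfl
      rw [Nat.mul_zero] at hk
      omega
    have hk1 : k ≠ 1 := by
      rintro rfl
      rw [Nat.mul_one] at hk
      omega
    omega
  have hcdvd : min m k ∣ n.natAbs := by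
    rcases le_total m k with h | h
    · rw [min_eq_left h]
      exact ⟨k, hk⟩
    · rw [min_eq_right h]
      exact ⟨m, by rw [hk, Nat.mul_comm]⟩
  have hcc : min m k * min m k ≤ n.natAbs := by
    rw [hk]
    exact Nat.mul_le_mul (min_le_left _ _) (min_le_right _ _)
  have hcInt : ((min m k : Nat) : Int) ∣ n := by
    have h := Int.natCast_dvd_natCast.mpr hcdvd
    rwa [Int.natAbs_of_nonneg (by omega : (0:Int) ≤ n)] at h
  have hc2 : (2 : Int) ≤ ((min m k : Nat) : Int) := by
    have := le_min hm2 hk2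
    omega
  have hclt : ((min m k : Nat) : Int) < dq := by
    by_contra hge
    push_neg at hge
    apply hbig
    calc dq * dq ≤ ((min m k : Nat) : Int) * ((min m k : Nat) : Int) :=
          mul_le_mul hge hge (by omega) (by omega)
    _ = ((min m k * min m k : Nat) : Int) := by push_cast; ring
    _ ≤ (n.natAbs : Int) := Int.ofNat_le.mpr hcc
    _ = n := Int.natAbs_of_nonneg (by omega)
  exact hmin _ hc2 hclt hcInt

-- full invariant of the outer factorisation loop
theorem pfOuter_spec (n d : Int) (fs : List (Int × Int)) :
    1 ≤ n → 2 ≤ d → (∀ m, 2 ≤ m → m < d → ¬ m ∣ n) →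
    ∃ t, (pfOuter n d fs).2 = fs ++ t
      ∧ 1 ≤ (pfOuter n d fs).1
      ∧ n = (t.map (fun pe => pe.1 ^ pe.2.toNat)).prod * (pfOuter n d fs).1
      ∧ (∀ pe ∈ t, Prime pe.1 ∧ d ≤ pe.1 ∧ 1 ≤ pe.2)
      ∧ t.Pairwise (fun a b => a.1 < b.1)
      ∧ (∀ m, 2 ≤ m → m ∣ (pfOuter n d fs).1 → (∀ pe ∈ t, pe.1 < m))
      ∧ ((pfOuter n d fs).1 = 1 ∨ Prime (pfOuter n d fs).1) := by
  induction n, d, fs using pfOuter.induct with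
  | case1 n d fs hdd hmod r ih =>
    intro h1 h2 hmin
    have hd0 : (0:Int) < d := by omega
    have hmod' : n % d = 0 := by rwa [PySem.Int.mod_eq_emod_of_pos hd0] at hmod
    have hdvd : d ∣ n := Int.dvd_of_emod_eq_zero hmod'
    obtain ⟨i1, i2, _, i4, i5⟩ := pfInner_spec n d 0 h1 h2
    have hr2pos : 1 ≤ (pfInner n d 0).2 := i5 hdvd
    have hr1dvd : (pfInner n d 0).1 ∣ n := ⟨d ^ ((pfInner n d 0).2 - 0).toNat, i4⟩
    have hmin' : ∀ m, 2 ≤ m → m < d + 1 → ¬ m ∣ (pfInner n d 0).1 := by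
      intro m hm2 hmd hmdvd
      by_cases hmd' : m = d
      · exact i2 (hmd' ▸ hmdvd)
      · exact hmin m hm2 (by omega) (hmdvd.trans hr1dvd)
    obtain ⟨t', e1, e2, e3, e4, e5, e6, e7⟩ := ih i1 (by omega) hmin'
    have hstep : pfOuter n d fs
        = pfOuter (pfInner n d 0).1 (d + 1) (fs ++ [(d, (pfInner n d 0).2)]) := by
      rw [pfOuter, dif_pos hdd, if_pos hmod]
    rw [hstep]
    have hfdvd : (pfOuter (pfInner n d 0).1 (d + 1) (fs ++ [(d, (pfInner n d 0).2)])).1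
        ∣ (pfInner n d 0).1 :=
      by
      refine ⟨(t'.map (fun pe => pe.1 ^ pe.2.toNat)).prod, ?_⟩
      conv_lhs => rw [e3]
      ring
    refine ⟨(d, (pfInner n d 0).2) :: t', ?_, e2, ?_, ?_, ?_, ?_, e7⟩
    · rw [e1, List.append_assoc]
      rfl
    · rw [List.map_cons, List.prod_cons]
      rw [e3, sub_zero] at i4
      conv_lhs => rw [i4]
      ring
    · intro pe hpe
      rcases List.mem_cons.mp hpe with rfl | hpe'
      · exact ⟨pf_prime_of_min d n h2 hdvd h1 hmin, le_refl d, hr2pos⟩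
      · obtain ⟨q1, q2, q3⟩ := e4 pe hpe'
        exact ⟨q1, by omega, q3⟩
    · rw [List.pairwise_cons]
      refine ⟨?_, e5⟩
      intro pe hpe
      have := (e4 pe hpe).2.1
      omega
    · intro m hm2 hmdvd pe hpe
      rcases List.mem_cons.mp hpe with rfl | hpe'
      · by_contra hle
        exact hmin' m hm2 (by omega) (hmdvd.trans hfdvd)
      · exact e6 m hm2 hmdvd pe hpe'
  | case2 n d fs hdd hmod ih =>
    intro h1 h2 hmin
    have hd0 : (0:Int) < d := by omega
    have hnd : ¬ d ∣ n := by
      intro hdvd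
      exact hmod (by rw [PySem.Int.mod_eq_emod_of_pos hd0]; exact Int.emod_eq_zero_of_dvd hdvd)
    have hmin' : ∀ m, 2 ≤ m → m < d + 1 → ¬ m ∣ n := by
      intro m hm2 hmd
      by_cases hmd' : m = d
      · exact hmd' ▸ hnd
      · exact hmin m hm2 (by omega)
    obtain ⟨t', e1, e2, e3, e4, e5, e6, e7⟩ := ih h1 (by omega) hmin'
    have hstep : pfOuter n d fs = pfOuter n (d + 1) fs := by
      rw [pfOuter, dif_pos hdd, if_neg hmod]
    rw [hstep]
    refine ⟨t', e1, e2, e3, ?_, e5, e6, e7⟩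
    intro pe hpe
    obtain ⟨q1, q2, q3⟩ := e4 pe hpe
    exact ⟨q1, by omega, q3⟩
  | case3 n d fs hdd =>
    intro h1 h2 hmin
    have hstep : pfOuter n d fs = (n, fs) := by rw [pfOuter, dif_neg hdd]
    rw [hstep]
    refine ⟨[], by simp, h1, by simp, by simp, List.Pairwise.nil, by simp, ?_⟩
    by_cases hn1 : n = 1
    · exact Or.inl hn1
    · exact Or.inr (pf_prime_of_no_small n d (by omega) h2 hdd hmin)

-- the factor list of A: increasing primes with positive exponents whose prime powers multiply to A
theorem pfFactors_spec (A : Int) (hA : 1 ≤ A) :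
    (∀ pe ∈ pfFactors A, Prime pe.1 ∧ 2 ≤ pe.1 ∧ 1 ≤ pe.2)
      ∧ (pfFactors A).Pairwise (fun a b => a.1 < b.1)
      ∧ A = ((pfFactors A).map (fun pe => pe.1 ^ pe.2.toNat)).prod := by
  obtain ⟨t, e1, e2, e3, e4, e5, e6, e7⟩ := pfOuter_spec A 2 [] hA (le_refl 2)
    (fun m hm2 hmlt => absurd (lt_of_le_of_lt hm2 hmlt) (lt_irrefl 2))
  have e1' : (pfOuter A 2 []).2 = t := by simpa using e1
  have hfac : pfFactors A = if 1 < (pfOuter A 2 []).1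
      then (pfOuter A 2 []).2 ++ [((pfOuter A 2 []).1, 1)] else (pfOuter A 2 []).2 := rfl
  by_cases hbig : 1 < (pfOuter A 2 []).1
  · have hprime : Prime (pfOuter A 2 []).1 := by
      rcases e7 with h | h
      · omega
      · exact h
    rw [hfac, if_pos hbig, e1']
    refine ⟨?_, ?_, ?_⟩
    · intro pe hpe
      rcases List.mem_append.mp hpe with hpe' | hpe'
      · obtain ⟨q1, q2, q3⟩ := e4 pe hpe'
        exact ⟨q1, q2, q3⟩
      · rcases List.mem_singleton.mp hpe' with rfl
        exact ⟨hprime, by omega, le_refl 1⟩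
    · rw [List.pairwise_append]
      refine ⟨e5, List.pairwise_singleton _ _, ?_⟩
      intro a ha b hb
      rcases List.mem_singleton.mp hb with rfl
      exact e6 (pfOuter A 2 []).1 (by omega) (dvd_refl _) a ha
    · rw [List.map_append, List.prod_append]
      have hone : ((([((pfOuter A 2 []).1, (1 : Int))] : List (Int × Int)).map
          (fun pe => pe.1 ^ pe.2.toNat)).prod : Int) = (pfOuter A 2 []).1 := by simp
      rw [hone]
      exact e3
  · have hone : (pfOuter A 2 []).1 = 1 := by omega
    rw [hfac, if_neg hbig, e1']
    refine ⟨?_, e5, ?_⟩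
    · intro pe hpe
      obtain ⟨q1, q2, q3⟩ := e4 pe hpe
      exact ⟨q1, q2, q3⟩
    · rw [e3, hone, mul_one]

-- uniqueness of the p-power decomposition (p prime to y, y')
theorem pf_pow_eq (p : Int) (hp2 : 2 ≤ p) :
    ∀ (k k' : Nat) (y y' : Int), ¬ p ∣ y → ¬ p ∣ y' → y * p ^ k = y' * p ^ k' → k = k' ∧ y = y' := by
  intro k
  induction k with
  | zero =>
    intro k' y y' hy hy' heq
    cases k' with
    | zero =>
      simp only [pow_zero, mul_one] at heq
      exact ⟨rfl, heq⟩
    | succ k' =>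
      exfalso
      apply hy
      rw [pow_zero, mul_one] at heq
      exact heq ▸ Dvd.intro (y' * p ^ k') (by ring)
  | succ k ih =>
    intro k' y y' hy hy' heq
    cases k' with
    | zero =>
      exfalso
      apply hy'
      rw [pow_zero, mul_one] at heq
      exact heq ▸ Dvd.intro (y * p ^ k) (by ring)
    | succ k' =>
      have hcancel : y * p ^ k = y' * p ^ k' := by
        have hp0 : p ≠ 0 := by omega
        apply mul_right_cancel₀ hp0
        rw [mul_assoc, ← pow_succ, mul_assoc, ← pow_succ]
        exact heq
      obtain ⟨hk, hyy⟩ := ih k' y y' hy hy' hcancel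
      exact ⟨by omega, hyy⟩

-- existence of the p-power decomposition for a positive divisor of M * p^E
theorem pf_decomp (p M : Int) (hp : Prime p) (hp2 : 2 ≤ p) (hpM : ¬ p ∣ M) :
    ∀ (E : Nat) (x : Int), 0 < x → x ∣ M * p ^ E →
      ∃ k ≤ E, ∃ y, 0 < y ∧ y ∣ M ∧ x = y * p ^ k := by
  intro E
  induction E with
  | zero =>
    intro x hx hdvd
    rw [pow_zero, mul_one] at hdvd
    exact ⟨0, le_refl 0, x, hx, hdvd, by rw [pow_zero, mul_one]⟩
  | succ E ih =>
    intro x hx hdvd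
    by_cases hpx : p ∣ x
    · obtain ⟨x₁, rfl⟩ := hpx
      have hx₁ : 0 < x₁ := by nlinarith
      have hdvd' : x₁ ∣ M * p ^ E := by
        have h := hdvd
        rw [pow_succ, ← mul_assoc] at h
        have h2 : x₁ * p ∣ (M * p ^ E) * p := by
          rwa [mul_comm p x₁] at h
        exact (mul_dvd_mul_iff_right (by omega : p ≠ 0)).mp h2
      obtain ⟨k, hk, y, hy, hyM, rfl⟩ := ih x₁ hx₁ hdvd'
      exact ⟨k + 1, by omega, y, hy, hyM, by rw [pow_succ]; ring⟩
    · have hcop : IsCoprime x p := ((hp.coprime_iff_not_dvd).mpr hpx).symm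
      have hxM : x ∣ M := (hcop.pow_right).dvd_of_dvd_mul_right hdvd
      exact ⟨0, by omega, x, hx, hxM, by rw [pow_zero, mul_one]⟩

-- one comprehension step: from the divisor list of M to the divisor list of M * p^e
theorem pfStep_spec (p e M : Int) (divs : List Int) (hp : Prime p) (hp2 : 2 ≤ p) (he : 0 ≤ e)
    (hM : 0 < M) (hpM : ¬ p ∣ M) (hnd : divs.Nodup) (hmem : ∀ x, x ∈ divs ↔ 0 < x ∧ x ∣ M) :
    (divs.flatMap (fun x => (PySem.List.pyRange 0 (e + 1) 1).map (fun k => x * p ^ k.toNat))).Nodup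
      ∧ ∀ x, x ∈ divs.flatMap (fun x => (PySem.List.pyRange 0 (e + 1) 1).map (fun k => x * p ^ k.toNat))
          ↔ 0 < x ∧ x ∣ M * p ^ e.toNat := by
  have hnotp : ∀ y ∈ divs, ¬ p ∣ y := fun y hy hpy => hpM (hpy.trans ((hmem y).mp hy).2)
  have hone : ¬ p ∣ (1 : Int) := by
    intro h
    have := Int.le_of_dvd one_pos h
    omega
  constructor
  · rw [List.nodup_flatMap]
    constructor
    · intro y hy
      apply List.Nodup.map_on ?_ (PySem.List.nodup_pyRange_one 0 (e + 1))
      intro k1 hk1 k2 hk2 heq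
      have hy0 : 0 < y := ((hmem y).mp hy).1
      have h1 := (PySem.List.mem_pyRange_one).mp hk1
      have h2 := (PySem.List.mem_pyRange_one).mp hk2
      have hpe : p ^ k1.toNat = p ^ k2.toNat := mul_left_cancel₀ (by omega) heq
      have hkk := pf_pow_eq p hp2 k1.toNat k2.toNat 1 1 hone hone
        (by rw [one_mul, one_mul, hpe])
      omega
    · refine List.Pairwise.imp_of_mem ?_ hnd
      intro a b ha hb hab x hxa hxb
      obtain ⟨k1, hk1, hx1⟩ := List.mem_map.mp hxa
      obtain ⟨k2, hk2, hx2⟩ := List.mem_map.mp hxb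
      have hkk := pf_pow_eq p hp2 k1.toNat k2.toNat a b (hnotp a ha) (hnotp b hb)
        (by rw [hx1, hx2])
      exact hab hkk.2
  · intro x
    constructor
    · intro hx
      obtain ⟨y, hy, hxm⟩ := List.mem_flatMap.mp hx
      obtain ⟨k, hk, rfl⟩ := List.mem_map.mp hxm
      obtain ⟨hk0, hke⟩ := (PySem.List.mem_pyRange_one).mp hk
      obtain ⟨hy0, hyM⟩ := (hmem y).mp hy
      exact ⟨mul_pos hy0 (pow_pos (by omega) _),
        mul_dvd_mul hyM (pow_dvd_pow p (by omega : k.toNat ≤ e.toNat))⟩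
    · rintro ⟨hx0, hxdvd⟩
      obtain ⟨k, hk, y, hy0, hyM, rfl⟩ := pf_decomp p M hp hp2 hpM e.toNat x hx0 hxdvd
      refine List.mem_flatMap.mpr ⟨y, (hmem y).mpr ⟨hy0, hyM⟩, ?_⟩
      refine List.mem_map.mpr ⟨(k : Int), ?_, by rw [Int.toNat_natCast]⟩
      exact (PySem.List.mem_pyRange_one).mpr ⟨by omega, by omega⟩

-- the fold over the factor list maintains 'divs = the positive divisors of the product so far'
theorem pfDivs_fold_spec : ∀ (fs : List (Int × Int)) (divs : List Int) (M : Int), 0 < M →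
    (∀ pe ∈ fs, Prime pe.1 ∧ 2 ≤ pe.1 ∧ 1 ≤ pe.2 ∧ ¬ pe.1 ∣ M) →
    fs.Pairwise (fun a b => a.1 ≠ b.1) →
    divs.Nodup → (∀ x, x ∈ divs ↔ 0 < x ∧ x ∣ M) →
    (fs.foldl (fun divs pe =>
        divs.flatMap (fun x => (PySem.List.pyRange 0 (pe.2 + 1) 1).map (fun k => x * pe.1 ^ k.toNat))) divs).Nodup
      ∧ ∀ x, x ∈ fs.foldl (fun divs pe =>
            divs.flatMap (fun x => (PySem.List.pyRange 0 (pe.2 + 1) 1).map (fun k => x * pe.1 ^ k.toNat))) divs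
          ↔ 0 < x ∧ x ∣ M * (fs.map (fun pe => pe.1 ^ pe.2.toNat)).prod := by
  intro fs
  induction fs with
  | nil =>
    intro divs M hM hfs hpw hnd hmem
    simp only [List.foldl_nil, List.map_nil, List.prod_nil, mul_one]
    exact ⟨hnd, hmem⟩
  | cons pe fs ih =>
    intro divs M hM hfs hpw hnd hmem
    obtain ⟨hp, hp2, he1, hpM⟩ := hfs pe List.mem_cons_self
    obtain ⟨snd, smem⟩ := pfStep_spec pe.1 pe.2 M divs hp hp2 (by omega) hM hpM hnd hmem
    rw [List.foldl_cons]
    have hM' : 0 < M * pe.1 ^ pe.2.toNat := mul_pos hM (pow_pos (by omega) _)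
    have hfs' : ∀ q ∈ fs, Prime q.1 ∧ 2 ≤ q.1 ∧ 1 ≤ q.2 ∧ ¬ q.1 ∣ M * pe.1 ^ pe.2.toNat := by
      intro q hq
      obtain ⟨hq1, hq2, hq3, hq4⟩ := hfs q (List.mem_cons_of_mem _ hq)
      refine ⟨hq1, hq2, hq3, ?_⟩
      intro hqd
      rcases (Prime.dvd_mul hq1).mp hqd with h | h
      · exact hq4 h
      · have hqp : q.1 ∣ pe.1 := hq1.dvd_of_dvd_pow h
        have heq : q.1 = pe.1 := by
          have hq' := Int.prime_iff_natAbs_prime.mp hq1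
          have hp' := Int.prime_iff_natAbs_prime.mp hp
          have hd := Int.natAbs_dvd_natAbs.mpr hqp
          have := (Nat.prime_dvd_prime_iff_eq hq' hp').mp hd
          omega
        exact (List.pairwise_cons.mp hpw).1 q hq heq.symm
    obtain ⟨r1, r2⟩ := ih _ _ hM' hfs' (List.pairwise_cons.mp hpw).2 snd smem
    refine ⟨r1, fun x => ?_⟩
    rw [r2 x, List.map_cons, List.prod_cons, ← mul_assoc]

-- the generated list holds exactly the positive divisors, each once
theorem pfDivs_spec (A : Int) (hA : 1 ≤ A) :
    (pfDivs (pfFactors A)).Nodup ∧ ∀ x, x ∈ pfDivs (pfFactors A) ↔ 0 < x ∧ x ∣ A := by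
  obtain ⟨hmemb, hpw, hprod⟩ := pfFactors_spec A hA
  have hinit : ∀ x, x ∈ ([1] : List Int) ↔ 0 < x ∧ x ∣ 1 := by
    intro x
    constructor
    · intro hx
      rcases List.mem_singleton.mp hx with rfl
      exact ⟨one_pos, dvd_refl 1⟩
    · rintro ⟨hx0, hxd⟩
      have := Int.eq_one_of_dvd_one (by omega) hxd
      simp [this]
  obtain ⟨r1, r2⟩ := pfDivs_fold_spec (pfFactors A) [1] 1 one_pos
    (fun pe hpe => ⟨(hmemb pe hpe).1, (hmemb pe hpe).2.1, (hmemb pe hpe).2.2, fun hd => by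
      have h1 := Int.le_of_dvd one_pos hd
      have h2 := (hmemb pe hpe).2.1
      omega⟩)
    (hpw.imp (fun h => ne_of_lt h))
    (by simp : ([1] : List Int).Nodup)
    hinit
  refine ⟨r1, fun x => ?_⟩
  have := r2 x
  rw [one_mul, ← hprod] at this
  exact this

-- B counts the palindromic divisors in [1, A]
theorem pfAlt_eq_card (A : Int) (hA : 1 ≤ A) :
    palindromic_factors_alt A = ((pfSet A 1 (fun d => is_palindromic d = true)).card : Int) := by
  obtain ⟨hnd, hmem⟩ := pfDivs_spec A hA
  unfold palindromic_factors_alt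
  rw [if_neg (by omega)]
  rw [PySem.List.foldl_count_if]
  have hfin : (pfDivs (pfFactors A)).toFinset = (Finset.Ico 1 (A + 1)).filter (fun d => A % d = 0) := by
    apply Finset.ext
    intro d
    simp only [List.mem_toFinset, Finset.mem_filter, Finset.mem_Ico, hmem]
    constructor
    · rintro ⟨h0, hdvd⟩
      exact ⟨⟨by omega, by have := Int.le_of_dvd (by omega) hdvd; omega⟩,
        Int.emod_eq_zero_of_dvd hdvd⟩
    · rintro ⟨⟨h1, h2⟩, hm⟩
      exact ⟨by omega, Int.dvd_of_emod_eq_zero hm⟩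
  rw [List.countP_eq_length_filter,
    ← List.toFinset_card_of_nodup (hnd.filter _), List.toFinset_filter, hfin,
    Finset.filter_filter]
  unfold pfSet
  norm_num

-- ===== VERDICT (by name: the statement is the Claim_ definition above) =====
theorem palindromic_factors_spec : Claim_equal_palindromic_factors := by
  intro A _
  unfold Spec_palindromic_factors palindromic_factors
  by_cases hA : 1 ≤ A
  · rw [pfAlt_eq_card A hA, pfLoop_eq_card A hA 1 0 le_rfl,
      pf_bij A hA, pf_split A]
    ring
  · unfold palindromic_factors_alt
    rw [pfLoop, dif_neg (by omega), if_pos (by omega)]
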